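-- pv_equiv track=rewrite | github.com/YuliannaKololmoiets/laba3 | laba3/ex2/ex2.py | sorted_edges
-- ===== SOURCE A (Python) =====
-- from collections import defaultdict
--
-- def sorted_edges(n, edges):
--     graph = defaultdict(list)
--
--     for u, v in edges:
--         graph[u].append(v)
--         graph[v].append(u)
--
--     result = []
--     for i in range(1, n + 1):
--         neighbors = sorted(graph[i]) if i in graph else []
--         result.append(" ".join(map(str, neighbors)))
--
--     return result
-- ===== SOURCE B (Python) =====
-- def sorted_edges(n, edges):
--     # One global sort of all directed pairs, then a single linear sweep grouping
--     # consecutive pairs by vertex (instead of a dict plus a per-vertex sort).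
--     pairs = sorted(p for u, v in edges for p in ((u, v), (v, u)))
--     m = len(pairs)
--     res = []
--     k = 0
--     for i in range(1, n + 1):
--         while k < m and pairs[k][0] < i:
--             k += 1
--         parts = []
--         while k < m and pairs[k][0] == i:
--             parts.append(str(pairs[k][1]))
--             k += 1
--         res.append(" ".join(parts))
--     return res
-- ===== Notes on version B (the rewrite author's own statement) =====
-- stated objective: faster
-- what changed: Replaces the defaultdict adjacency build plus a per-vertex sort with one global sort of all directed (vertex, neighbor) pairs followed by a single two-pointer sweep over range(1, n+1) that groups consecutive pairs by vertex.
import Mathlib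
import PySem

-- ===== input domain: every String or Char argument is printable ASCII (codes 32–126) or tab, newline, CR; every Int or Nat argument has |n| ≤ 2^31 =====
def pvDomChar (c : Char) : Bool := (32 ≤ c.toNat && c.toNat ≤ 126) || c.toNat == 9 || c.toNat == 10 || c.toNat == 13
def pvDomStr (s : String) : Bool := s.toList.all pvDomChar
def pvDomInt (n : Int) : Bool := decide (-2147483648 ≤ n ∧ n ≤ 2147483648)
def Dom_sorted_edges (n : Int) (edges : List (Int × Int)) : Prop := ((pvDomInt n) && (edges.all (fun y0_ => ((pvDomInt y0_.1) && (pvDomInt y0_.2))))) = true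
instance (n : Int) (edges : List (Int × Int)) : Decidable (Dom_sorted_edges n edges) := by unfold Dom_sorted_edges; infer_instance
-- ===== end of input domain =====

-- ===== PORT A =====
-- B replaces A's defaultdict grouping + per-vertex sorts by one global sort of all
-- directed pairs and a single two-pointer sweep (measured faster in a timing run).
def sorted_edges (n : Int) (edges : List (Int × Int)) : List String :=
  let graph := edges.foldl
    (fun d p => (d.modify p.1 [] (fun l => l ++ [p.2])).modify p.2 [] (fun l => l ++ [p.1]))
    PySem.Dict.empty
  (PySem.List.pyRange 1 (n + 1) 1).foldl
    (fun res i =>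
      let neighbors := if graph.contains i then PySem.List.sorted (graph.getD i []) (fun x => x) false else []
      res ++ [PySem.Str.join " " (neighbors.map PySem.Int.toStr)]) []

-- ===== PORT B =====
-- the generator (p for u, v in edges for p in ((u, v), (v, u)))
def pvFlatPairs (edges : List (Int × Int)) : List (Int × Int) :=
  edges.flatMap (fun p => [(p.1, p.2), (p.2, p.1)])

-- while k < m and pairs[k][0] < i: k += 1   (the guard makes the index dereference safe)
def pvSkipLt (pairs : List (Int × Int)) (i : Int) (k : Nat) : Nat :=
  if h : k < pairs.length then
    if (pairs[k]'h).1 < i then pvSkipLt pairs i (k + 1) else k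
  else k
termination_by pairs.length - k

-- while k < m and pairs[k][0] == i: parts.append(str(pairs[k][1])); k += 1
def pvCollect (pairs : List (Int × Int)) (i : Int) (k : Nat) (parts : List String) :
    List String × Nat :=
  if h : k < pairs.length then
    if (pairs[k]'h).1 == i then
      pvCollect pairs i (k + 1) (parts ++ [PySem.Int.toStr (pairs[k]'h).2])
    else (parts, k)
  else (parts, k)
termination_by pairs.length - k

def sorted_edges_alt (n : Int) (edges : List (Int × Int)) : List String :=
  let pairs := PySem.List.sorted2 (pvFlatPairs edges) (fun p => p.1) (fun p => p.2) false
  ((PySem.List.pyRange 1 (n + 1) 1).foldl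
    (fun st i =>
      let k1 := pvSkipLt pairs i st.2
      let pk := pvCollect pairs i k1 []
      (st.1 ++ [PySem.Str.join " " pk.1], pk.2)) (([] : List String), (0 : Nat))).1

-- ===== PRECONDITION & SPEC =====
def Spec_sorted_edges (n : Int) (edges : List (Int × Int)) (out : List String) : Prop := out = sorted_edges_alt n edges
instance (n : Int) (edges : List (Int × Int)) (out : List String) : Decidable (Spec_sorted_edges n edges out) := by unfold Spec_sorted_edges; infer_instance

-- ===== CLAIM (what is proved, stated in full; the proofs are below) =====
def Claim_equal_sorted_edges : Prop := ∀ (n : Int) (edges : List (Int × Int)), Dom_sorted_edges n edges → Spec_sorted_edges n edges (sorted_edges n edges)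

-- ===== LEMMAS AND PROOFS =====

-- the comparator sorted2 uses (definitional)
def pvBef : (Int × Int) → (Int × Int) → Bool :=
  fun a b => decide (a.1 < b.1) || (!decide (b.1 < a.1) && decide (a.2 < b.2))

-- weak lexicographic order on pairs
def pvLex (p q : Int × Int) : Prop := p.1 < q.1 ∨ (p.1 = q.1 ∧ p.2 ≤ q.2)

theorem pvSorted2_eq (xs : List (Int × Int)) :
    PySem.List.sorted2 xs (fun p => p.1) (fun p => p.2) false =
      xs.foldl (fun acc x => PySem.List.insertBy pvBef x acc) [] := rfl

theorem pvLex_trans {a b c : Int × Int} (h1 : pvLex a b) (h2 : pvLex b c) : pvLex a c := by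
  unfold pvLex at *; omega

theorem pvLex_of_bef {a b : Int × Int} (h : pvBef a b = true) : pvLex a b := by
  unfold pvBef at h; unfold pvLex; simp at h; omega

theorem pvLex_of_not_bef {a b : Int × Int} (h : pvBef a b = false) : pvLex b a := by
  unfold pvBef at h; unfold pvLex; simp at h; omega

theorem pvInsertBy_pairwise (x : Int × Int) :
    ∀ ys : List (Int × Int), ys.Pairwise pvLex →
      (PySem.List.insertBy pvBef x ys).Pairwise pvLex := by
  intro ys
  induction ys with
  | nil => intro _; simp [PySem.List.insertBy]
  | cons y t ih =>
    intro hp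
    rw [List.pairwise_cons] at hp
    have hins : PySem.List.insertBy pvBef x (y :: t) =
        if pvBef x y then x :: y :: t else y :: PySem.List.insertBy pvBef x t := by
      simp [PySem.List.insertBy]
    rw [hins]
    by_cases hb : pvBef x y = true
    · rw [if_pos hb]
      refine List.pairwise_cons.mpr ⟨?_, List.pairwise_cons.mpr hp⟩
      intro z hz
      rcases List.mem_cons.mp hz with rfl | hz'
      · exact pvLex_of_bef hb
      · exact pvLex_trans (pvLex_of_bef hb) (hp.1 z hz')
    · rw [if_neg hb]
      refine List.pairwise_cons.mpr ⟨?_, ih hp.2⟩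
      intro z hz
      rcases (PySem.List.mem_insertBy _ _ _ _).mp hz with rfl | hz'
      · exact pvLex_of_not_bef (by simpa using hb)
      · exact hp.1 z hz'
theorem pvSorted2_pairwise (xs : List (Int × Int)) :
    (PySem.List.sorted2 xs (fun p => p.1) (fun p => p.2) false).Pairwise pvLex := by
  rw [pvSorted2_eq]
  suffices h : ∀ (l : List (Int × Int)) (acc : List (Int × Int)), acc.Pairwise pvLex →
      (l.foldl (fun acc x => PySem.List.insertBy pvBef x acc) acc).Pairwise pvLex by
    exact h xs [] (by simp)
  intro l
  induction l with
  | nil => intro acc h; simpa using h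
  | cons x t ih => intro acc h; exact ih _ (pvInsertBy_pairwise x acc h)

-- fst is nondecreasing along a pvLex-pairwise list
theorem pvFstLe_of_pairwise {l : List (Int × Int)} (h : l.Pairwise pvLex) :
    l.Pairwise (fun p q => p.1 ≤ q.1) :=
  h.imp (fun hpq => by unfold pvLex at hpq; omega)

-- ---- grouping a fst-monotone list ----

theorem pvFilter_eq_nil_of_lt {i : Int} :
    ∀ {t : List (Int × Int)}, (∀ q ∈ t, i < q.1) →
      t.filter (fun p => p.1 == i) = [] := by
  intro t h
  rw [List.filter_eq_nil_iff]
  intro p hp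
  have := h p hp
  simp; omega

theorem pvTakeWhile_eq_filter_of_lb {i : Int} :
    ∀ {t : List (Int × Int)}, t.Pairwise (fun p q => p.1 ≤ q.1) → (∀ q ∈ t, i ≤ q.1) →
      t.takeWhile (fun p => p.1 == i) = t.filter (fun p => p.1 == i) := by
  intro t
  induction t with
  | nil => intro _ _; rfl
  | cons q t ih =>
    intro hp hlb
    rw [List.pairwise_cons] at hp
    by_cases hq : q.1 = i
    · simp only [List.takeWhile_cons, List.filter_cons]
      simp only [hq, beq_self_eq_true, if_true]
      rw [ih hp.2 (fun z hz => hlb z (List.mem_cons_of_mem _ hz))]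
    · have hgt : i < q.1 := lt_of_le_of_ne (hlb q (List.mem_cons_self)) (Ne.symm hq)
      have hb : (q.1 == i) = false := by simp [hq]
      simp only [List.takeWhile_cons, List.filter_cons, hb, if_false, Bool.false_eq_true]
      rw [pvFilter_eq_nil_of_lt (fun z hz => lt_of_lt_of_le hgt (hp.1 z hz))]

theorem pvDropWhile_eq_of_lb {i : Int} :
    ∀ {t : List (Int × Int)}, (∀ q ∈ t, i ≤ q.1) →
      t.dropWhile (fun p => p.1 == i) = t.dropWhile (fun p => decide (p.1 < i + 1)) := by
  intro t
  induction t with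
  | nil => intro _; rfl
  | cons q t ih =>
    intro hlb
    by_cases hq : q.1 = i
    · have h1 : (q.1 == i) = true := by simp [hq]
      have h2 : decide (q.1 < i + 1) = true := by simp; omega
      simp only [List.dropWhile_cons, h1, h2, if_true]
      exact ih (fun z hz => hlb z (List.mem_cons_of_mem _ hz))
    · have hgt : i < q.1 := lt_of_le_of_ne (hlb q (List.mem_cons_self)) (Ne.symm hq)
      have h1 : (q.1 == i) = false := by simp [hq]
      have h2 : decide (q.1 < i + 1) = false := by simp; omega
      simp only [List.dropWhile_cons, h1, h2, Bool.false_eq_true, if_false]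

-- takeWhile (== i) after dropWhile (< i) over a fst-monotone list is filter (== i)
theorem pvGroup_eq_filter (i : Int) :
    ∀ {l : List (Int × Int)}, l.Pairwise (fun p q => p.1 ≤ q.1) →
      (l.dropWhile (fun p => decide (p.1 < i))).takeWhile (fun p => p.1 == i) =
        l.filter (fun p => p.1 == i) := by
  intro l
  induction l with
  | nil => intro _; rfl
  | cons p t ih =>
    intro hp
    rw [List.pairwise_cons] at hp
    by_cases hlt : p.1 < i
    · have h1 : decide (p.1 < i) = true := by simp [hlt]
      have h2 : (p.1 == i) = false := by simp; omega
      simp only [List.dropWhile_cons, h1, if_true, List.filter_cons, h2, Bool.false_eq_true,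
        if_false]
      exact ih hp.2
    · have h1 : decide (p.1 < i) = false := by simp [hlt]
      simp only [List.dropWhile_cons, h1, Bool.false_eq_true, if_false]
      by_cases hq : p.1 = i
      · have h2 : (p.1 == i) = true := by simp [hq]
        simp only [List.takeWhile_cons, List.filter_cons, h2, if_true]
        rw [pvTakeWhile_eq_filter_of_lb hp.2 (fun z hz => hq ▸ hp.1 z hz)]
      · have hgt : i < p.1 := by omega
        have h2 : (p.1 == i) = false := by simp [hq]
        simp only [List.takeWhile_cons, List.filter_cons, h2, Bool.false_eq_true, if_false]
        rw [pvFilter_eq_nil_of_lt (fun z hz => lt_of_lt_of_le hgt (hp.1 z hz))]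

-- consuming the (== i) group after dropWhile (< i) leaves dropWhile (< i+1)
theorem pvGroup_drop (i : Int) :
    ∀ {l : List (Int × Int)}, l.Pairwise (fun p q => p.1 ≤ q.1) →
      (l.dropWhile (fun p => decide (p.1 < i))).dropWhile (fun p => p.1 == i) =
        l.dropWhile (fun p => decide (p.1 < i + 1)) := by
  intro l
  induction l with
  | nil => intro _; rfl
  | cons p t ih =>
    intro hp
    rw [List.pairwise_cons] at hp
    by_cases hlt : p.1 < i
    · have h1 : decide (p.1 < i) = true := by simp [hlt]
      have h2 : decide (p.1 < i + 1) = true := by simp; omega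
      simp only [List.dropWhile_cons, h1, h2, if_true]
      exact ih hp.2
    · have h1 : decide (p.1 < i) = false := by simp [hlt]
      simp only [List.dropWhile_cons, h1, Bool.false_eq_true, if_false]
      by_cases hq : p.1 = i
      · have h2 : (p.1 == i) = true := by simp [hq]
        have h3 : decide (p.1 < i + 1) = true := by simp; omega
        simp only [h2, h3, if_true]
        exact pvDropWhile_eq_of_lb (fun z hz => hq ▸ hp.1 z hz)
      · have h2 : (p.1 == i) = false := by simp [hq]
        have h3 : decide (p.1 < i + 1) = false := by simp; omega
        simp only [h2, h3, Bool.false_eq_true, if_false]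

-- drop past the takeWhile prefix is dropWhile
theorem pvDrop_length_takeWhile {α : Type} (p : α → Bool) :
    ∀ l : List α, l.drop (l.takeWhile p).length = l.dropWhile p := by
  intro l
  induction l with
  | nil => rfl
  | cons x t ih =>
    by_cases hx : p x = true
    · simp [hx, ih]
    · simp only [Bool.not_eq_true] at hx
      simp [hx]

-- ---- characterising the two while loops ----

theorem pvSkipLt_drop (pairs : List (Int × Int)) (i : Int) :
    ∀ k, pairs.drop (pvSkipLt pairs i k) =
      (pairs.drop k).dropWhile (fun p => decide (p.1 < i)) := by
  intro k
  fun_induction pvSkipLt pairs i k with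
  | case1 k h hlt ih =>
    rw [List.drop_eq_getElem_cons h, List.dropWhile_cons]
    simp only [hlt, decide_true, if_true]
    exact ih
  | case2 k h hlt =>
    rw [List.drop_eq_getElem_cons h, List.dropWhile_cons]
    simp [hlt]
  | case3 k h =>
    have : pairs.drop k = [] := List.drop_eq_nil_of_le (by omega)
    simp [this]

theorem pvCollect_eq (pairs : List (Int × Int)) (i : Int) :
    ∀ k parts, pvCollect pairs i k parts =
      (parts ++ ((pairs.drop k).takeWhile (fun p => p.1 == i)).map
          (fun p => PySem.Int.toStr p.2),
        k + ((pairs.drop k).takeWhile (fun p => p.1 == i)).length) := by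
  intro k parts
  fun_induction pvCollect pairs i k parts with
  | case1 k parts h heq ih =>
    rw [ih, List.drop_eq_getElem_cons h, List.takeWhile_cons]
    simp only [heq, if_true, List.map_cons, List.length_cons, Prod.mk.injEq]
    exact ⟨by simp, by omega⟩
  | case2 k parts h heq =>
    rw [List.drop_eq_getElem_cons h, List.takeWhile_cons]
    simp [heq]
  | case3 k parts h =>
    have : pairs.drop k = [] := List.drop_eq_nil_of_le (by omega)
    simp [this]

theorem pvDropWhile_idem {α : Type} (p : α → Bool) :
    ∀ l : List α, (l.dropWhile p).dropWhile p = l.dropWhile p := by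
  intro l
  induction l with
  | nil => rfl
  | cons x t ih =>
    by_cases hx : p x = true
    · simp [hx, ih]
    · simp only [Bool.not_eq_true] at hx
      simp [hx]

-- ---- B's sweep produces filter groups ----

theorem pvSweep (pairs : List (Int × Int)) (hp : pairs.Pairwise (fun p q => p.1 ≤ q.1))
    (b : Int) :
    ∀ (t : Nat) (a : Int) (res : List String) (k : Nat), (b - a).toNat = t →
      (pairs.drop k).dropWhile (fun p => decide (p.1 < a)) =
        pairs.dropWhile (fun p => decide (p.1 < a)) →
      ((PySem.List.pyRange a b 1).foldl
        (fun st i =>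
          let k1 := pvSkipLt pairs i st.2
          let pk := pvCollect pairs i k1 []
          (st.1 ++ [PySem.Str.join " " pk.1], pk.2)) (res, k)).1 =
        res ++ (PySem.List.pyRange a b 1).map
          (fun i => PySem.Str.join " "
            ((pairs.filter (fun p => p.1 == i)).map (fun p => PySem.Int.toStr p.2))) := by
  intro t
  induction t with
  | zero =>
    intro a res k ht _
    rw [PySem.List.pyRange_one_eq_nil (by omega)]
    simp
  | succ m ih =>
    intro a res k ht hinv
    by_cases hab : a < b
    · rw [PySem.List.pyRange_one_cons hab]
      simp only [List.foldl_cons, List.map_cons]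
      have hskip : pairs.drop (pvSkipLt pairs a k) =
          pairs.dropWhile (fun p => decide (p.1 < a)) := by
        rw [pvSkipLt_drop, hinv]
      have hgroup : (pairs.drop (pvSkipLt pairs a k)).takeWhile (fun p => p.1 == a) =
          pairs.filter (fun p => p.1 == a) := by
        rw [hskip]; exact pvGroup_eq_filter a hp
      have hdrop2 : pairs.drop (pvSkipLt pairs a k +
          ((pairs.drop (pvSkipLt pairs a k)).takeWhile (fun p => p.1 == a)).length) =
          pairs.dropWhile (fun p => decide (p.1 < a + 1)) := by
        rw [← List.drop_drop, pvDrop_length_takeWhile, hskip]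
        exact pvGroup_drop a hp
      rw [pvCollect_eq]
      simp only [List.nil_append]
      rw [ih (a + 1) _ _ (by omega) (by rw [hdrop2, pvDropWhile_idem])]
      rw [hgroup]
      simp
    · rw [PySem.List.pyRange_one_eq_nil (by omega)]
      simp

-- ---- A's build loop over the flattened pairs ----

theorem pvBuild (edges : List (Int × Int)) :
    ∀ d : PySem.Dict Int (List Int),
      edges.foldl
        (fun d p => (d.modify p.1 [] (fun l => l ++ [p.2])).modify p.2 [] (fun l => l ++ [p.1]))
        d =
      (pvFlatPairs edges).foldl (fun d p => d.modify p.1 [] (fun l => l ++ [p.2])) d := by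
  induction edges with
  | nil => intro d; rfl
  | cons e t ih =>
    intro d
    simp only [pvFlatPairs, List.flatMap_cons, List.foldl_append, List.foldl_cons,
      List.foldl_nil] at *
    exact ih _

theorem pvGraph_getD (edges : List (Int × Int)) (i : Int) :
    (edges.foldl
        (fun d p => (d.modify p.1 [] (fun l => l ++ [p.2])).modify p.2 [] (fun l => l ++ [p.1]))
        PySem.Dict.empty).getD i [] =
      ((pvFlatPairs edges).filter (fun p => p.1 == i)).map (fun p => p.2) := by
  rw [pvBuild, PySem.Dict.getD_foldl_modify_append]
  simp

-- the contains-branch collapses: an absent key holds the empty list, whose sort is []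
theorem pvBranch (graph : PySem.Dict Int (List Int)) (i : Int) :
    (if graph.contains i then PySem.List.sorted (graph.getD i []) (fun x => x) false else []) =
      PySem.List.sorted (graph.getD i []) (fun x => x) false := by
  by_cases hc : graph.contains i = true
  · rw [if_pos hc]
  · rw [if_neg hc]
    have hnone : graph.get? i = none :=
      (PySem.Dict.get?_eq_none_iff_contains graph i).mpr (by simpa using hc)
    rw [PySem.Dict.getD_eq_get?_getD, hnone]
    rfl

-- per-vertex: A's sort of the raw neighbor list names B's slice of the globally sorted pairs
theorem pvEntry (edges : List (Int × Int)) (i : Int) :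
    PySem.List.sorted (((pvFlatPairs edges).filter (fun p => p.1 == i)).map (fun p => p.2))
        (fun x => x) false =
      ((PySem.List.sorted2 (pvFlatPairs edges) (fun p => p.1) (fun p => p.2) false).filter
          (fun p => p.1 == i)).map (fun p => p.2) := by
  apply PySem.List.eq_of_perm_of_pairwise_le_of_injective (fun x : Int => x)
    (fun a b h => h)
  · exact (PySem.List.sorted_perm _ _ _).trans
      (((PySem.List.sorted2_perm _ _ _ _).filter _).map _).symm
  · exact PySem.List.sorted_pairwise _ _
  · rw [List.pairwise_map]
    refine List.Pairwise.imp_of_mem ?_ ((pvSorted2_pairwise (pvFlatPairs edges)).filter _)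
    intro a b ha hb hab
    have ha' : a.1 = i := by simpa using (List.mem_filter.mp ha).2
    have hb' : b.1 = i := by simpa using (List.mem_filter.mp hb).2
    unfold pvLex at hab
    omega

-- A as a map over the vertex range
theorem pvA_eq_map (n : Int) (edges : List (Int × Int)) :
    sorted_edges n edges =
      (PySem.List.pyRange 1 (n + 1) 1).map (fun i =>
        PySem.Str.join " "
          ((PySem.List.sorted (((pvFlatPairs edges).filter (fun p => p.1 == i)).map
              (fun p => p.2)) (fun x => x) false).map PySem.Int.toStr)) := by
  unfold sorted_edges
  simp only []
  set g : PySem.Dict Int (List Int) := edges.foldl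
    (fun d p => (d.modify p.1 [] (fun l => l ++ [p.2])).modify p.2 [] (fun l => l ++ [p.1]))
    PySem.Dict.empty with hg
  rw [PySem.List.foldl_append_singleton_eq_map (fun i =>
    PySem.Str.join " "
      (((if g.contains i then PySem.List.sorted (g.getD i []) (fun x => x) false
          else []) : List Int).map PySem.Int.toStr))]
  rw [List.nil_append]
  apply List.map_congr_left
  intro i _
  rw [pvBranch, hg, pvGraph_getD]

-- B as the same map, through the sweep lemma
theorem pvB_eq_map (n : Int) (edges : List (Int × Int)) :
    sorted_edges_alt n edges =
      (PySem.List.pyRange 1 (n + 1) 1).map (fun i =>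
        PySem.Str.join " "
          (((PySem.List.sorted2 (pvFlatPairs edges) (fun p => p.1) (fun p => p.2)
              false).filter (fun p => p.1 == i)).map (fun p => PySem.Int.toStr p.2))) := by
  unfold sorted_edges_alt
  simp only []
  rw [pvSweep (PySem.List.sorted2 (pvFlatPairs edges) (fun p => p.1) (fun p => p.2) false)
    (pvFstLe_of_pairwise (pvSorted2_pairwise (pvFlatPairs edges))) (n + 1)
    ((n + 1) - 1).toNat 1 [] 0 rfl (by rw [List.drop_zero])]
  rw [List.nil_append]

-- ===== VERDICT (by name: the statement is the Claim_ definition above) =====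
theorem sorted_edges_spec : Claim_equal_sorted_edges := by
  intro n edges _
  unfold Spec_sorted_edges
  rw [pvA_eq_map, pvB_eq_map]
  apply List.map_congr_left
  intro i _
  rw [pvEntry, List.map_map]
  rfl
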